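-- pv_equiv track=rewrite | github.com/etschgi1/AoC_22 | 3/3b.py | transform
-- ===== SOURCE A (Python) =====
-- def transform(data):  # transform into numbers
--     temp = []
--     for d in data:
--         t = []
--         for l in d:
--             t.append(ord(l)-38 if l.isupper() else ord(l)-96)
--         temp.append(t)
--     l, out = [], []
--     for c, e in enumerate(temp):
--         l.append(e)
--         if c % 3 == 2:
--             out.append(l)
--             l = []
--     return out
-- ===== SOURCE B (Python) =====
-- def transform(data):  # transform into numbers
--     def priorities(row):
--         return [ord(c) - 38 if c.isupper() else ord(c) - 96 for c in row]
--     rows = list(reversed(data))  # worklist: original front is at the top of the stack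
--     out = []
--     while len(rows) >= 3:
--         out.append([priorities(rows.pop()), priorities(rows.pop()), priorities(rows.pop())])
--     return out
-- ===== Notes on version B (the rewrite author's own statement) =====
-- stated objective: alternative
-- what changed: A does a staged full conversion pass and then an enumerate/modulo accumulate-and-flush grouping loop; B keeps no counter and no converted intermediate list: it reverses the input into a mutable worklist stack and a while-loop pops three rows at a time, converting each row to priorities at the moment it is popped.
import Mathlib
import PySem

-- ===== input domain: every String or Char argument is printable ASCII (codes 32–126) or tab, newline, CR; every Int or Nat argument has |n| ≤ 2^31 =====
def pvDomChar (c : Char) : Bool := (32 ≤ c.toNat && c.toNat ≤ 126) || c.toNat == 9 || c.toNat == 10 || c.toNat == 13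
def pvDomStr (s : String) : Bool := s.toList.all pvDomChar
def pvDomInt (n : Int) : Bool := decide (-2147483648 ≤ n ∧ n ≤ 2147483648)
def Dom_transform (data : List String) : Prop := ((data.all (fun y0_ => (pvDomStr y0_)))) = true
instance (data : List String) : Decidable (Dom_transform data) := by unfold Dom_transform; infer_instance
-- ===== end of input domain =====

-- B replaces A's staged conversion pass + enumerate/modulo accumulate-and-flush grouping with a
-- reversed worklist stack popped three rows at a time, converting rows as they are popped (alternative decomposition).

-- ===== PORT A =====
def transform (data : List String) : List (List (List Int)) :=
  let temp := data.foldl (fun temp d =>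
    temp ++ [d.toList.foldl (fun t l =>
      t ++ [if PySem.Chars.isupper l then (l.toNat : Int) - 38 else (l.toNat : Int) - 96]) []]) []
  let r := (PySem.List.enumerate temp 0).foldl
    (fun (st : List (List Int) × List (List (List Int))) ce =>
      let l := st.1 ++ [ce.2]
      if PySem.Int.mod ce.1 3 == 2 then ([], st.2 ++ [l]) else (l, st.2)) ([], [])
  r.2

-- ===== PORT B =====
def pvPriorities (row : String) : List Int :=
  row.toList.map (fun c =>
    if PySem.Chars.isupper c then (c.toNat : Int) - 38 else (c.toNat : Int) - 96)

-- rows.pop() on a nonempty Python list returns the last element and leaves the rest: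
-- here getLast! / dropLast (the `rows.length ≥ 3` guard makes all three pops succeed, as in the Python).
def pvLoopB (rows : List String) (out : List (List (List Int))) : List (List (List Int)) :=
  if rows.length ≥ 3 then
    let a := rows.getLast!
    let rows1 := rows.dropLast
    let b := rows1.getLast!
    let rows2 := rows1.dropLast
    let c := rows2.getLast!
    let rows3 := rows2.dropLast
    pvLoopB rows3 (out ++ [[pvPriorities a, pvPriorities b, pvPriorities c]])
  else out
termination_by rows.length
decreasing_by simp_all [List.length_dropLast]; omega

def transform_alt (data : List String) : List (List (List Int)) :=
  pvLoopB data.reverse []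

-- ===== PRECONDITION & SPEC =====
def Spec_transform (data : List String) (out : List (List (List Int))) : Prop := out = transform_alt data
instance (data : List String) (out : List (List (List Int))) : Decidable (Spec_transform data out) := by unfold Spec_transform; infer_instance

-- ===== CLAIM (what is proved, stated in full; the proofs are below) =====
def Claim_equal_transform : Prop := ∀ (data : List String), Dom_transform data → Spec_transform data (transform data)

-- ===== LEMMAS AND PROOFS =====

theorem foldl_append_map {α β : Type} (g : α → β) :
    ∀ (xs : List α) (init : List β),
      xs.foldl (fun acc x => acc ++ [g x]) init = init ++ xs.map g := by
  intro xs
  induction xs with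
  | nil => simp
  | cons x xs ih => intro init; simp [ih]

-- reference result: chunk a row list into triples of priority lists, dropping a trailing partial group
def pvChunkMap : List String → List (List (List Int))
  | a :: b :: c :: rest => [pvPriorities a, pvPriorities b, pvPriorities c] :: pvChunkMap rest
  | _ => []

-- reference form of A's grouping loop: r = index % 3, buf = pending group
def pvH {α : Type} : Nat → List α → List α → List (List α)
  | _, _, [] => []
  | r, buf, x :: xs =>
      if r = 2 then (buf ++ [x]) :: pvH 0 [] xs else pvH (r + 1) (buf ++ [x]) xs

theorem loop_eq_H {α : Type} :
    ∀ (xs : List α) (n : Nat) (buf : List α) (out : List (List α)),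
      ((PySem.List.enumerate xs (n : Int)).foldl
        (fun (st : List α × List (List α)) ce =>
          if PySem.Int.mod ce.1 3 == 2 then ([], st.2 ++ [st.1 ++ [ce.2]])
          else (st.1 ++ [ce.2], st.2)) (buf, out)).2
      = out ++ pvH (n % 3) buf xs := by
  intro xs
  induction xs with
  | nil => intro n buf out; simp [pvH]
  | cons x xs ih =>
      intro n buf out
      rw [PySem.List.enumerate_cons]
      simp only [List.foldl_cons]
      have hmod : PySem.Int.mod (n : Int) 3 = ((n % 3 : Nat) : Int) := by
        rw [PySem.Int.mod_eq_emod_of_pos (by norm_num : (0:Int) < 3)]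
        omega
      have hcast : ((n : Int) + 1) = (((n + 1 : Nat)) : Int) := by push_cast; ring
      by_cases h2 : n % 3 = 2
      · have hcond : (PySem.Int.mod (n : Int) 3 == 2) = true := by
          rw [hmod, h2]; rfl
        rw [hcond]
        simp only [if_true]
        rw [hcast, ih (n + 1) [] (out ++ [buf ++ [x]])]
        have h0 : (n + 1) % 3 = 0 := by omega
        rw [h0]
        simp [pvH, h2]
      · have hcond : (PySem.Int.mod (n : Int) 3 == 2) = false := by
          rw [hmod]; simp; omega
        rw [hcond]
        simp only [Bool.false_eq_true, if_false]
        rw [hcast, ih (n + 1) (buf ++ [x]) out]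
        have h1 : (n + 1) % 3 = n % 3 + 1 := by omega
        simp [pvH, h2, h1]

theorem H_eq_chunkMap : (xs : List String) →
    pvH 0 [] (xs.map pvPriorities) = pvChunkMap xs
  | [] => rfl
  | [_] => rfl
  | [_, _] => rfl
  | a :: b :: c :: rest => by
      simp only [List.map_cons, pvH, pvChunkMap]
      simp [H_eq_chunkMap rest]

-- rows.pop(): last element of l ++ [x] is x
theorem pv_getLast!_concat {α : Type} [Inhabited α] (l : List α) (x : α) :
    (l ++ [x]).getLast! = x := by
  induction l with
  | nil => rfl
  | cons y ys ih => simpa [List.getLast!] using ih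

theorem loopB_rev : (xs : List String) → (out : List (List (List Int))) →
    pvLoopB xs.reverse out = out ++ pvChunkMap xs
  | [], out => by simp [pvLoopB, pvChunkMap]
  | [_], out => by simp [pvLoopB, pvChunkMap]
  | [_, _], out => by simp [pvLoopB, pvChunkMap]
  | a :: b :: c :: rest, out => by
      rw [pvLoopB]
      have hrev : (a :: b :: c :: rest).reverse = rest.reverse ++ [c, b, a] := by simp
      rw [hrev]
      have hlen : (rest.reverse ++ [c, b, a]).length ≥ 3 := by simp
      rw [if_pos hlen]
      have e1 : (rest.reverse ++ [c, b, a]) = (rest.reverse ++ [c, b]) ++ [a] := by simp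
      have e2 : (rest.reverse ++ [c, b]) = (rest.reverse ++ [c]) ++ [b] := by simp
      simp only [e1, pv_getLast!_concat, List.dropLast_concat]
      simp only [e2, pv_getLast!_concat, List.dropLast_concat, pv_getLast!_concat,
        List.dropLast_concat]
      rw [loopB_rev rest]
      simp [pvChunkMap]
termination_by xs _ => xs.length

-- ===== VERDICT (by name: the statement is the Claim_ definition above) =====
theorem transform_spec : Claim_equal_transform := by
  intro data _
  show transform data = transform_alt data
  unfold transform transform_alt
  rw [foldl_append_map]
  simp only [List.nil_append]
  have hin : (fun (d : String) => d.toList.foldl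
      (fun t l => t ++ [if PySem.Chars.isupper l then (l.toNat : Int) - 38
        else (l.toNat : Int) - 96]) []) = pvPriorities := by
    funext d; rw [foldl_append_map]; rfl
  rw [hin]
  have h := loop_eq_H (data.map pvPriorities) 0 [] []
  simp only [Nat.cast_zero, Nat.zero_mod] at h
  rw [H_eq_chunkMap] at h
  rw [h, loopB_rev]
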